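-- pv_equiv track=rewrite | github.com/GuillaumeHERMOSO/IA02-HITMAN | src/Class_HitmanKnowledge.py | ajouter_zeros_autour
-- ===== SOURCE A (Python) =====
-- def ajouter_zeros_autour(tableau_original):
--     n = len(tableau_original)
--     i = 0
--     m = len(tableau_original[i])
--     tableau_resultat = [[0] * (3 * m) for _ in range(3 * n)]
--
--     for i in range(n):
--         for j in range(m):
--             x = 3 * i + 1
--             y = 3 * j + 1
--             tableau_resultat[x][y] = tableau_original[i][j]
--
--     return tableau_resultat
-- ===== SOURCE B (Python) =====
-- def ajouter_zeros_autour(tableau_original):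
--     m = len(tableau_original[0])
--     resultat = []
--     for ligne in tableau_original:
--         zeros = [0] * (3 * m)
--         valeurs = []
--         for j in range(m):
--             valeurs += [0, ligne[j], 0]
--         resultat += [zeros, valeurs, zeros]
--     return resultat
-- ===== Notes on version B (the rewrite author's own statement) =====
-- stated objective: simpler
-- what changed: B builds the result constructively row by row (each input row yields a zero row, an interleaved value row, and a zero row, all concatenated) instead of preallocating a 3n x 3m zero grid and scattering values into it by index.
import Mathlib
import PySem

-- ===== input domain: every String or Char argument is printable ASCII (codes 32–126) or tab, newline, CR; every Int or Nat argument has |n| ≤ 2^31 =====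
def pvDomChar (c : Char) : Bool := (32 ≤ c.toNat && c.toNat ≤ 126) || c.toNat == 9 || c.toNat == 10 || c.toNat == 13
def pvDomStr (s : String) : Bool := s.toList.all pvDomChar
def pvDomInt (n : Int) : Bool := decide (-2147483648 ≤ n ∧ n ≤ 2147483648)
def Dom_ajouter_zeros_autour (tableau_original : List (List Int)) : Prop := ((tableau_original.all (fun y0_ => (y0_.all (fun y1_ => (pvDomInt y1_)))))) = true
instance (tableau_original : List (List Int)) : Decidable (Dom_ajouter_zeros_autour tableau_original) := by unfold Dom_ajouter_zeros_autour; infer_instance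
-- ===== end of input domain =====

-- B builds the 3n x 3m result constructively row by row instead of preallocating a zero
-- grid and scattering values into it by index; objective: simpler (same cost).


-- ===== PORT A =====
-- literal transliteration of A: preallocate a (3n) x (3m) zero grid, then for i in range(n),
-- j in range(m) set grid[3i+1][3j+1] := t[i][j].  'tableau_original[0]' raises IndexError on
-- empty input and 't[i][j]' raises on rows shorter than m: those inputs are outside Pre_ below
-- (the port reads them with headD/getD, unconstrained there).
def ajouter_zeros_autour (tableau_original : List (List Int)) : List (List Int) :=
  let n := tableau_original.length
  let m := (tableau_original.headD []).length
  let tableau_resultat := List.replicate (3 * n) (List.replicate (3 * m) (0 : Int))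
  (List.range n).foldl (fun g i =>
    (List.range m).foldl (fun g j =>
      let x := 3 * i + 1
      let y := 3 * j + 1
      g.set x ((g.getD x []).set y ((tableau_original.getD i []).getD j 0)) ) g) tableau_resultat

-- ===== PORT B =====
-- transliteration of Source B: for each input row emit [zero row, interleaved value row, zero row]
def ajouter_zeros_autour_alt (tableau_original : List (List Int)) : List (List Int) :=
  let m := (tableau_original.headD []).length
  tableau_original.foldl (fun resultat ligne =>
    let zeros := List.replicate (3 * m) (0 : Int)
    let valeurs := (List.range m).foldl (fun v j => v ++ [0, ligne.getD j 0, 0]) []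
    resultat ++ [zeros, valeurs, zeros]) []

-- ===== PRECONDITION & SPEC =====
-- Pre_ excludes exactly the inputs where the Python A raises IndexError: the empty list
-- (tableau_original[0]) and inputs with a row shorter than the first row (t[i][j] with j < m).
def Pre_ajouter_zeros_autour (tableau_original : List (List Int)) : Prop :=
  tableau_original ≠ [] ∧
  ∀ r ∈ tableau_original, (tableau_original.headD []).length ≤ r.length
instance (tableau_original : List (List Int)) : Decidable (Pre_ajouter_zeros_autour tableau_original) := by unfold Pre_ajouter_zeros_autour; infer_instance
def pvWitness_ajouter_zeros_autour : List (List Int) := [[1, 2], [3, 4]]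

def Spec_ajouter_zeros_autour (tableau_original : List (List Int)) (out : List (List Int)) : Prop := out = ajouter_zeros_autour_alt tableau_original
instance (tableau_original : List (List Int)) (out : List (List Int)) : Decidable (Spec_ajouter_zeros_autour tableau_original out) := by unfold Spec_ajouter_zeros_autour; infer_instance

-- ===== CLAIM (what is proved, stated in full; the proofs are below) =====
def Claim_equal_ajouter_zeros_autour : Prop := ∀ (tableau_original : List (List Int)), Dom_ajouter_zeros_autour tableau_original → Pre_ajouter_zeros_autour tableau_original → Spec_ajouter_zeros_autour tableau_original (ajouter_zeros_autour tableau_original)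

-- ===== LEMMAS AND PROOFS =====

-- the interleaved value row B builds for one input row (definitionally B's inner fold)
def pvVrow (m : Nat) (r : List Int) : List Int :=
  (List.range m).foldl (fun v j => v ++ [0, r.getD j 0, 0]) []

theorem pvVrow_succ (m : Nat) (r : List Int) :
    pvVrow (m + 1) r = pvVrow m r ++ [0, r.getD m 0, 0] := by
  simp [pvVrow, List.range_succ]

theorem pvVrow_length (m : Nat) (r : List Int) : (pvVrow m r).length = 3 * m := by
  induction m with
  | zero => simp [pvVrow]
  | succ k ih => simp [pvVrow_succ, ih]; omega

-- collapsing A's inner grid fold to a single set of row x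
theorem pvInner_collapse (l : List Nat) (g : List (List Int)) (x : Nat) (hx : x < g.length)
    (f : Nat → Int) :
    l.foldl (fun g j => g.set x ((g.getD x []).set (3 * j + 1) (f j))) g
      = g.set x (l.foldl (fun row j => row.set (3 * j + 1) (f j)) (g.getD x [])) := by
  induction l generalizing g with
  | nil =>
    simp only [List.foldl_nil, List.getD]
    rw [List.getElem?_eq_getElem hx]
    simp [List.set_getElem_self]
  | cons a l ih =>
    simp only [List.foldl_cons]
    rw [ih _ (by simpa using hx)]
    simp [List.getD, List.getElem?_set_self (by simpa using hx), List.set_set]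

-- A's row-level fold on an all-zero row produces B's interleaved row
theorem pvRow_fold (m k : Nat) (hk : k ≤ m) (r : List Int) :
    (List.range k).foldl (fun row j => row.set (3 * j + 1) (r.getD j 0))
        (List.replicate (3 * m) (0 : Int))
      = pvVrow k r ++ List.replicate (3 * (m - k)) (0 : Int) := by
  induction k with
  | zero => simp [pvVrow]
  | succ k ih =>
    have hk' : k ≤ m := Nat.le_of_succ_le hk
    rw [List.range_succ, List.foldl_append, ih hk']
    have hrep : 3 * (m - k) = 3 * (m - (k + 1)) + 3 := by omega
    rw [List.foldl_cons, List.foldl_nil]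
    rw [List.set_append_right _ _ (by simp [pvVrow_length])]
    rw [pvVrow_length, pvVrow_succ]
    have : 3 * k + 1 - 3 * k = 1 := by omega
    rw [this, hrep]
    simp [List.replicate_succ, List.append_assoc]

-- block list for the first k rows
def pvBlocks (m : Nat) (t : List (List Int)) : List (List Int) :=
  t.flatMap (fun r => [List.replicate (3 * m) (0 : Int), pvVrow m r,
                       List.replicate (3 * m) (0 : Int)])

theorem pvBlocks_length (m : Nat) (t : List (List Int)) : (pvBlocks m t).length = 3 * t.length := by
  induction t with
  | nil => simp [pvBlocks]
  | cons a t ih => simp [pvBlocks] at ih ⊢; omega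

theorem pvGrid_fold (t : List (List Int)) (m k : Nat) (hk : k ≤ t.length) :
    (List.range k).foldl (fun g i =>
        (List.range m).foldl (fun g j =>
          g.set (3 * i + 1) ((g.getD (3 * i + 1) []).set (3 * j + 1)
            ((t.getD i []).getD j 0))) g)
        (List.replicate (3 * t.length) (List.replicate (3 * m) (0 : Int)))
      = pvBlocks m (t.take k) ++
        List.replicate (3 * (t.length - k)) (List.replicate (3 * m) (0 : Int)) := by
  induction k with
  | zero => simp [pvBlocks]
  | succ k ih =>
    have hk' : k ≤ t.length := Nat.le_of_succ_le hk
    rw [List.range_succ, List.foldl_append, ih hk', List.foldl_cons, List.foldl_nil]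
    have hlen : (pvBlocks m (t.take k)).length = 3 * k := by
      rw [pvBlocks_length, List.length_take_of_le hk']
    have hxlen : 3 * k + 1 < (pvBlocks m (t.take k) ++
        List.replicate (3 * (t.length - k)) (List.replicate (3 * m) (0 : Int))).length := by
      simp [hlen]; omega
    rw [pvInner_collapse _ _ _ hxlen]
    have hrep : 3 * (t.length - k) = 3 * (t.length - (k + 1)) + 3 := by omega
    have hget : (pvBlocks m (t.take k) ++
        List.replicate (3 * (t.length - k)) (List.replicate (3 * m) (0 : Int))).getD (3 * k + 1) []
        = List.replicate (3 * m) (0 : Int) := by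
      rw [List.getD, List.getElem?_append_right (by omega), hlen]
      have : 3 * k + 1 - 3 * k = 1 := by omega
      rw [this, hrep]
      simp [List.replicate_succ]
    rw [hget, pvRow_fold m m (le_refl m), Nat.sub_self]
    rw [List.set_append_right _ _ (by omega), hlen]
    have h1 : 3 * k + 1 - 3 * k = 1 := by omega
    rw [h1, hrep]
    have htake : t.take (k + 1) = t.take k ++ [t.getD k []] := by
      have hlt : k < t.length := hk
      rw [List.getD, List.take_add_one, List.getElem?_eq_getElem hlt]
      simp
    rw [htake]
    simp [pvBlocks, List.replicate_succ, List.append_assoc]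

-- ===== VERDICT (by name: the statement is the Claim_ definition above) =====
theorem ajouter_zeros_autour_spec : Claim_equal_ajouter_zeros_autour := by
  intro t _ _
  show ajouter_zeros_autour t = ajouter_zeros_autour_alt t
  unfold ajouter_zeros_autour ajouter_zeros_autour_alt
  rw [pvGrid_fold t (t.headD []).length t.length (le_refl _)]
  rw [PySem.List.foldl_append_eq_flatMap]
  simp [pvBlocks, pvVrow, List.take_length]
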